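-- pv_equiv track=rewrite | github.com/MteaHubHug/BioinformaticsAlgorithms | ALGORITMI U BIOINFORMATICI/BioinformaticsAlgorithms_by_Matea/GenomeAssembling.py | in_edges
-- ===== SOURCE A (Python) =====
-- def in_edges(graph):
--     ins=[]
--     for key in graph:
--         lista=graph[key]
--         for el in lista:
--             ins.append(el)
--     uniques=list(set(ins))
--     inedges={}
--     for unique in uniques:
--         inedges[unique]=ins.count(unique)
--     return inedges
-- ===== SOURCE B (Python) =====
-- def in_edges(graph):
--     inedges = {}
--     for lista in graph.values():
--         for el in lista:
--             inedges[el] = inedges.get(el, 0) + 1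
--     return inedges
-- ===== Notes on version B (the rewrite author's own statement) =====
-- stated objective: faster
-- what changed: A flattens all adjacency lists, builds a set of unique nodes and calls list.count on the full flattened list once per unique node; B makes a single counting pass over the adjacency lists, incrementing a dict entry per element, with no flattened list, no set and no count scans.
import Mathlib
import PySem

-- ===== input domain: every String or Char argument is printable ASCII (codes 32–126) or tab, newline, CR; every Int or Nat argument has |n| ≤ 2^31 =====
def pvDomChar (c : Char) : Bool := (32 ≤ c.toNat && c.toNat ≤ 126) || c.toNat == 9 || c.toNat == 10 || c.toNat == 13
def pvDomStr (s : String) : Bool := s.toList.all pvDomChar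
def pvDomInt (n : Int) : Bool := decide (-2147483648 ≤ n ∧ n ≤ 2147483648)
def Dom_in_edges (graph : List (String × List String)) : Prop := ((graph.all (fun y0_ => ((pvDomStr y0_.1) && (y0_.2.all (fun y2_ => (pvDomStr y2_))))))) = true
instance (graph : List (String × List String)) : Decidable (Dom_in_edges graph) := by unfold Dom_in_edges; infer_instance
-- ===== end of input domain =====

-- B replaces A's flatten + set + repeated full-list .count passes by one counting pass
-- over the adjacency lists (objective: faster, O(n) vs O(n·u) counting).
-- Python set/dict iteration order is hash-dependent; outputs are compared as dicts (order ignored).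

-- ===== PORT A =====
def in_edges (graph : List (String × List String)) : List (String × Int) :=
  let g : PySem.Dict String (List String) := PySem.Dict.mk graph
  let ins : List String :=
    g.keys.foldl (fun ins key =>
      let lista := (g.get? key).getD []   -- graph[key]; key ∈ g.keys so the lookup never fails
      lista.foldl (fun ins el => ins ++ [el]) ins) []
  let uniques : List String := PySem.Set.ofList ins
  let inedges : PySem.Dict String Int :=
    uniques.foldl (fun d unique => d.insert unique ((PySem.List.count ins unique : Int))) PySem.Dict.empty
  inedges.items

-- ===== PORT B =====
def in_edges_alt (graph : List (String × List String)) : List (String × Int) :=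
  let inedges : PySem.Dict String Int :=
    graph.foldl (fun d p =>
      p.2.foldl (fun d el => d.insert el (d.getD el 0 + 1)) d) PySem.Dict.empty
  inedges.items

-- ===== PRECONDITION & SPEC =====
-- Pre_ excludes association lists with duplicate keys: a Python dict cannot contain
-- duplicate keys, so no input A accepts is excluded; it only pins down the assoc-list encoding.
def Pre_in_edges (graph : List (String × List String)) : Prop :=
  (graph.map Prod.fst).Nodup
instance (graph : List (String × List String)) : Decidable (Pre_in_edges graph) := by unfold Pre_in_edges; infer_instance
def pvWitness_in_edges : (List (String × List String)) :=
  [("a", ["b", "c", "b"]), ("b", ["c"]), ("c", [])]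
def Spec_in_edges (graph : List (String × List String)) (out : List (String × Int)) : Prop := out = in_edges_alt graph
instance (graph : List (String × List String)) (out : List (String × Int)) : Decidable (Spec_in_edges graph out) := by unfold Spec_in_edges; infer_instance

-- ===== CLAIM (what is proved, stated in full; the proofs are below) =====
def Claim_equal_in_edges : Prop := ∀ (graph : List (String × List String)), Dom_in_edges graph → Pre_in_edges graph → Spec_in_edges graph (in_edges graph)

-- ===== LEMMAS AND PROOFS =====

-- appending elements one by one is appending the list
theorem foldl_append_one {α : Type} (l acc : List α) :
    l.foldl (fun ins el => ins ++ [el]) acc = acc ++ l := by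
  induction l generalizing acc with
  | nil => simp
  | cons x xs ih => simp [List.foldl, ih, List.append_assoc]

-- under Nodup keys, the lookup of each key returns that pair's value
theorem get?_mk_of_mem {graph : List (String × List String)}
    (hnd : (graph.map Prod.fst).Nodup) {p : String × List String} (hp : p ∈ graph) :
    (PySem.Dict.mk graph).get? p.1 = some p.2 := by
  exact PySem.Dict.get?_of_mem_items (PySem.Dict.mk graph) hp hnd

-- A's flattening loop produces the concatenation of the adjacency lists
theorem insA_eq (graph : List (String × List String))
    (hnd : (graph.map Prod.fst).Nodup) :
    (PySem.Dict.mk graph).keys.foldl (fun ins key =>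
        (((PySem.Dict.mk graph).get? key).getD []).foldl (fun ins el => ins ++ [el]) ins) []
      = graph.flatMap Prod.snd := by
  have hkeys : (PySem.Dict.mk graph).keys = graph.map Prod.fst := rfl
  rw [hkeys, List.foldl_map]
  have hc : ∀ (acc : List String), ∀ p ∈ graph,
      (((PySem.Dict.mk graph).get? p.1).getD []).foldl (fun ins el => ins ++ [el]) acc
        = acc ++ p.2 := by
    intro acc p hp
    rw [get?_mk_of_mem hnd hp]
    exact foldl_append_one p.2 acc
  rw [PySem.List.foldl_congr_mem graph _ (fun acc p => acc ++ p.2) [] hc]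
  rw [PySem.List.foldl_append_eq_flatMap Prod.snd graph []]
  simp

-- A's second loop writes Counter(ins) as items
theorem loopA_eq_counter (ins : List String) :
    ((PySem.Set.ofList ins).foldl
        (fun d unique => d.insert unique ((PySem.List.count ins unique : Int))) PySem.Dict.empty).items
      = (PySem.Dict.counter ins).items := by
  have h := PySem.Dict.items_foldl_insert_fresh (PySem.Set.ofList ins) id
        (fun u => (PySem.List.count ins u : Int)) PySem.Dict.empty
        (by intro a _; rfl)
        (by simp [PySem.Set.nodup_ofList ins])
  simp only [id_eq] at h
  rw [h, PySem.Dict.items_counter]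
  simp [PySem.List.count_eq, PySem.Dict.empty]

-- B's nested loop is the counter of the flattened list
theorem loopB_eq_counter (graph : List (String × List String)) :
    graph.foldl (fun d p => p.2.foldl (fun d el => d.insert el (d.getD el 0 + 1)) d)
        (PySem.Dict.empty : PySem.Dict String Int)
      = PySem.Dict.counter (graph.flatMap Prod.snd) := by
  rw [← PySem.Dict.foldl_insert_getD_add_one_eq_counter, List.foldl_flatMap]

-- ===== VERDICT (by name: the statement is the Claim_ definition above) =====
theorem in_edges_spec : Claim_equal_in_edges := by
  intro graph _ hpre
  unfold Spec_in_edges in_edges in_edges_alt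
  simp only []
  rw [insA_eq graph hpre, loopA_eq_counter, loopB_eq_counter]
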